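-- pv_equiv track=rewrite | github.com/510YilinWu/honours-code | utils2.py | get_reach_speed_segments
-- ===== SOURCE A (Python) =====
-- def get_reach_speed_segments(results):
--     reach_speed_segments = {}
--
--     for date, hands_data in results.items():
--         reach_speed_segments[date] = {}
--         for hand, (indices, _) in hands_data.items():
--             reach_speed_segments[date][hand] = {}
--             for trial, trial_indices in indices.items():
--                 start_indices = [trial_indices[i] for i in range(len(trial_indices)) if i % 2 == 0]
--                 end_indices = [trial_indices[i] for i in range(len(trial_indices)) if i % 2 == 1]
--                 reach_speed_segments[date][hand][trial] = list(zip(start_indices, end_indices))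
--
--     return reach_speed_segments
-- ===== SOURCE B (Python) =====
-- def _pair_adjacent(trial_indices):
--     # single pass: hold one pending start, emit (start, end) on the next element
--     pairs = []
--     pending = None
--     for x in trial_indices:
--         if pending is None:
--             pending = x
--         else:
--             pairs.append((pending, x))
--             pending = None
--     return pairs
--
--
-- def get_reach_speed_segments(results):
--     return {
--         date: {
--             hand: {trial: _pair_adjacent(ti) for trial, ti in indices.items()}
--             for hand, (indices, _) in hands_data.items()
--         }
--         for date, hands_data in results.items()
--     }
-- ===== Notes on version B (the rewrite author's own statement) =====
-- stated objective: simpler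
-- what changed: B replaces A's two even/odd index comprehensions plus zip by a single adjacent-pairing pass over each trial list (a pending-start buffer, no indexing), and the three dict-building loops by nested dict comprehensions.
import Mathlib
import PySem

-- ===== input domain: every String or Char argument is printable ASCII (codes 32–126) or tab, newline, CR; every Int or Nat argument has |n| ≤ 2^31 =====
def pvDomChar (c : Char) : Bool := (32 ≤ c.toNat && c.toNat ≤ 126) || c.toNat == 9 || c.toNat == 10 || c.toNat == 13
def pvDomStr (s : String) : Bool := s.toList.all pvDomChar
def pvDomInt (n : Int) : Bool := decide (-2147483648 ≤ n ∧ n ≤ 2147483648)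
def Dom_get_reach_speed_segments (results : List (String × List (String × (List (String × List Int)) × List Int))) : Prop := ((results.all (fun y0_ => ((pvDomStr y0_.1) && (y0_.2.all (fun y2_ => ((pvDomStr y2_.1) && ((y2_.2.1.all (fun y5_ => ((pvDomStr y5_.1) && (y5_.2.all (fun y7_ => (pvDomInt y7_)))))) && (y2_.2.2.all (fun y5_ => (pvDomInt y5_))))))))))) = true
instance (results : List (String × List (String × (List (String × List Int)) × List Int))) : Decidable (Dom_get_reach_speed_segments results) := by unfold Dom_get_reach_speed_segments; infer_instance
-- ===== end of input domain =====

-- B replaces A's even/odd index comprehensions + zip by one adjacent-pairing pass and the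
-- dict-insertion loops by nested dict comprehensions (objective: simpler; same asymptotic cost).

-- ===== PORT A =====
-- [trial_indices[i] for i in range(len(trial_indices)) if i % 2 == 0]
-- (the index i always lies in range, so pyGetD's default 0 is never read)
def pvStartIndices (ti : List Int) : List Int :=
  ((PySem.List.pyRange 0 (ti.length : Int) 1).filter
    (fun i => PySem.Int.mod i 2 == 0)).map (fun i => PySem.List.pyGetD ti i 0)

-- [trial_indices[i] for i in range(len(trial_indices)) if i % 2 == 1]
def pvEndIndices (ti : List Int) : List Int :=
  ((PySem.List.pyRange 0 (ti.length : Int) 1).filter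
    (fun i => PySem.Int.mod i 2 == 1)).map (fun i => PySem.List.pyGetD ti i 0)

-- the innermost loop body: reach_speed_segments[date][hand][trial] = list(zip(start, end))
def pvTrialsA (indices : List (String × List Int)) : List (String × List (Int × Int)) :=
  (indices.foldl
    (fun d p => d.insert p.1 ((pvStartIndices p.2).zip (pvEndIndices p.2)))
    (PySem.Dict.empty : PySem.Dict String (List (Int × Int)))).items

-- the middle loop: reach_speed_segments[date][hand] = {} then filled per trial
def pvHandsA (hands_data : List (String × (List (String × List Int)) × List Int)) :
    List (String × List (String × List (Int × Int))) :=
  (hands_data.foldl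
    (fun d p => d.insert p.1 (pvTrialsA p.2.1))
    (PySem.Dict.empty : PySem.Dict String (List (String × List (Int × Int))))).items

def get_reach_speed_segments (results : List (String × List (String × (List (String × List Int)) × List Int))) : List (String × List (String × List (String × List (Int × Int)))) :=
  (results.foldl
    (fun d p => d.insert p.1 (pvHandsA p.2))
    (PySem.Dict.empty : PySem.Dict String (List (String × List (String × List (Int × Int)))))).items

-- ===== PORT B =====
-- _pair_adjacent:a single pass with a pending start element
def pvPairAdjacent (ti : List Int) : List (Int × Int) :=
  (ti.foldl
    (fun (s : List (Int × Int) × Option Int) x =>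
      match s.2 with
      | none => (s.1, some x)
      | some a => (s.1 ++ [(a, x)], none))
    ([], none)).1

def get_reach_speed_segments_alt (results : List (String × List (String × (List (String × List Int)) × List Int))) : List (String × List (String × List (String × List (Int × Int)))) :=
  results.map (fun dp =>
    (dp.1, dp.2.map (fun hp =>
      (hp.1, hp.2.1.map (fun tp =>
        (tp.1, pvPairAdjacent tp.2))))))

-- ===== PRECONDITION & SPEC =====
-- Pre_ requires distinct keys at every dict level: every Python dict satisfies this, so it
-- excludes only association lists that do not represent a Python dict at all.
def Pre_get_reach_speed_segments (results : List (String × List (String × (List (String × List Int)) × List Int))) : Prop :=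
  (results.map (·.1)).Nodup ∧
  ∀ p ∈ results, (p.2.map (·.1)).Nodup ∧ ∀ q ∈ p.2, (q.2.1.map (·.1)).Nodup
instance (results : List (String × List (String × (List (String × List Int)) × List Int))) : Decidable (Pre_get_reach_speed_segments results) := by unfold Pre_get_reach_speed_segments; infer_instance

def pvWitness_get_reach_speed_segments : (List (String × List (String × (List (String × List Int)) × List Int))) :=
  [("d1", [("left", ([("t1", [1, 2, 3, 4, 5])], [0, 9]))])]

def Spec_get_reach_speed_segments (results : List (String × List (String × (List (String × List Int)) × List Int))) (out : List (String × List (String × List (String × List (Int × Int))))) : Prop := out = get_reach_speed_segments_alt results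
instance (results : List (String × List (String × (List (String × List Int)) × List Int))) (out : List (String × List (String × List (String × List (Int × Int))))) : Decidable (Spec_get_reach_speed_segments results out) := by
  unfold Spec_get_reach_speed_segments
  letI h1 : DecidableEq (List (Int × Int)) := inferInstance
  letI h2 : DecidableEq (List (String × List (Int × Int))) := inferInstance
  letI h3 : DecidableEq (List (String × List (String × List (Int × Int)))) := inferInstance
  letI h4 : DecidableEq (List (String × List (String × List (String × List (Int × Int))))) := inferInstance
  exact h4 out _

-- ===== CLAIM (what is proved, stated in full; the proofs are below) =====
def Claim_equal_get_reach_speed_segments : Prop := ∀ (results : List (String × List (String × (List (String × List Int)) × List Int))), Dom_get_reach_speed_segments results → Pre_get_reach_speed_segments results → Spec_get_reach_speed_segments results (get_reach_speed_segments results)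

-- ===== LEMMAS AND PROOFS =====

-- canonical adjacent pairing, recursion two elements at a time
def pvChunk : List Int → List (Int × Int)
  | a :: b :: t => (a, b) :: pvChunk t
  | _ => []

theorem pvPairAdjacent_go (xs : List Int) : ∀ (acc : List (Int × Int)) (buf : Option Int),
    (xs.foldl
      (fun (s : List (Int × Int) × Option Int) x =>
        match s.2 with
        | none => (s.1, some x)
        | some a => (s.1 ++ [(a, x)], none))
      (acc, buf)).1
    = acc ++ (match buf with | none => pvChunk xs | some a => pvChunk (a :: xs)) := by
  induction xs with
  | nil =>
    intro acc buf
    cases buf <;> simp [pvChunk]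
  | cons x t ih =>
    intro acc buf
    cases buf with
    | none => simpa using ih acc (some x)
    | some a => simp [List.foldl_cons, ih (acc ++ [(a, x)]) none, pvChunk]

theorem pvPairAdjacent_eq_chunk (xs : List Int) : pvPairAdjacent xs = pvChunk xs := by
  simpa using pvPairAdjacent_go xs [] none

-- Nat-indexed normal forms of A's two comprehensions
def pvNFe (xs : List Int) : List Int :=
  ((List.range xs.length).filter (fun k => k % 2 == 0)).map (fun k => xs.getD k 0)
def pvNFo (xs : List Int) : List Int :=
  ((List.range xs.length).filter (fun k => k % 2 == 1)).map (fun k => xs.getD k 0)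

theorem pvStart_nf (xs : List Int) : pvStartIndices xs = pvNFe xs := by
  unfold pvStartIndices pvNFe
  rw [PySem.List.pyRange_one]
  simp only [Int.sub_zero, Int.toNat_natCast, List.filter_map, List.map_map]
  rw [List.filter_congr (q := fun k => k % 2 == 0) ?_]
  · refine List.map_congr_left ?_
    intro k hk
    simp [PySem.List.pyGetD_natCast]
  · intro k hk
    simp only [Function.comp_apply, zero_add]
    rw [PySem.Int.mod_eq_emod_of_pos (by norm_num)]
    have h2 : ((k : Int)) % 2 = ((k % 2 : Nat) : Int) := by omega
    rw [h2]
    rcases Nat.mod_two_eq_zero_or_one k with h | h <;> simp [h]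

theorem pvEnd_nf (xs : List Int) : pvEndIndices xs = pvNFo xs := by
  unfold pvEndIndices pvNFo
  rw [PySem.List.pyRange_one]
  simp only [Int.sub_zero, Int.toNat_natCast, List.filter_map, List.map_map]
  rw [List.filter_congr (q := fun k => k % 2 == 1) ?_]
  · refine List.map_congr_left ?_
    intro k hk
    simp [PySem.List.pyGetD_natCast]
  · intro k hk
    simp only [Function.comp_apply, zero_add]
    rw [PySem.Int.mod_eq_emod_of_pos (by norm_num)]
    have h2 : ((k : Int)) % 2 = ((k % 2 : Nat) : Int) := by omega
    rw [h2]
    rcases Nat.mod_two_eq_zero_or_one k with h | h <;> simp [h]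

-- stepping both normal forms two elements at a time
theorem pvNFe_cons₂ (a b : Int) (t : List Int) : pvNFe (a :: b :: t) = a :: pvNFe t := by
  unfold pvNFe
  simp only [List.length_cons]
  rw [List.range_succ_eq_map, List.range_succ_eq_map]
  simp only [List.map_cons, List.map_map, List.filter_cons]
  norm_num
  rw [List.filter_map, List.filter_congr (q := fun k => k % 2 == 0) ?_]
  · rw [List.map_map]
    refine List.map_congr_left ?_
    intro k hk
    simp [Function.comp]
  · intro k hk
    simp only [Function.comp_apply]
    have h : k.succ.succ % 2 = k % 2 := by omega
    rw [h]

theorem pvNFo_cons₂ (a b : Int) (t : List Int) : pvNFo (a :: b :: t) = b :: pvNFo t := by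
  unfold pvNFo
  simp only [List.length_cons]
  rw [List.range_succ_eq_map, List.range_succ_eq_map]
  simp only [List.map_cons, List.map_map, List.filter_cons]
  norm_num
  rw [List.filter_map, List.filter_congr (q := fun k => k % 2 == 1) ?_]
  · rw [List.map_map]
    refine List.map_congr_left ?_
    intro k hk
    simp [Function.comp]
  · intro k hk
    simp only [Function.comp_apply]
    have h : k.succ.succ % 2 = k % 2 := by omega
    rw [h]

theorem pvNF_zip : ∀ (xs : List Int), (pvNFe xs).zip (pvNFo xs) = pvChunk xs
  | [] => by simp [pvNFe, pvNFo, pvChunk]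
  | [a] => by simp [pvNFe, pvNFo, pvChunk, List.range_succ]
  | a :: b :: t => by
      rw [pvNFe_cons₂, pvNFo_cons₂, List.zip_cons_cons, pvNF_zip t]
      simp [pvChunk]

-- A's inner value equals the canonical adjacent pairing
theorem pvZip_nf_eq_chunk (xs : List Int) :
    (pvStartIndices xs).zip (pvEndIndices xs) = pvChunk xs := by
  rw [pvStart_nf, pvEnd_nf, pvNF_zip]

-- items of a fresh-keyed insertion loop starting from the empty dict is just a map
theorem pvItems_fold (α β : Type) (l : List (String × α)) (v : String × α → β)
    (h : (l.map (·.1)).Nodup) :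
    (l.foldl (fun d p => d.insert p.1 (v p)) (PySem.Dict.empty : PySem.Dict String β)).items
      = l.map (fun p => (p.1, v p)) := by
  have := PySem.Dict.items_foldl_insert_fresh (l := l) (k := (·.1)) (v := v)
    (d := (PySem.Dict.empty : PySem.Dict String β)) (by simp) h
  simpa using this

-- ===== VERDICT (by name: the statement is the Claim_ definition above) =====
theorem get_reach_speed_segments_spec : Claim_equal_get_reach_speed_segments := by
  intro results _hdom hpre
  obtain ⟨h1, h2⟩ := hpre
  unfold Spec_get_reach_speed_segments get_reach_speed_segments get_reach_speed_segments_alt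
  rw [pvItems_fold _ _ results (fun p => pvHandsA p.2) h1]
  refine List.map_congr_left ?_
  intro dp hdp
  obtain ⟨hh1, hh2⟩ := h2 dp hdp
  unfold pvHandsA
  rw [pvItems_fold _ _ dp.2 (fun p => pvTrialsA p.2.1) hh1]
  refine congrArg _ (List.map_congr_left ?_)
  intro hp hhp
  have ht1 := hh2 hp hhp
  unfold pvTrialsA
  rw [pvItems_fold _ _ hp.2.1 (fun p => (pvStartIndices p.2).zip (pvEndIndices p.2)) ht1]
  refine congrArg _ (List.map_congr_left ?_)
  intro tp htp
  rw [pvZip_nf_eq_chunk, pvPairAdjacent_eq_chunk]
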